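-- pv_equiv track=rewrite | github.com/parasiitism/AlgoDaily | leetcode/2358/main.py | maximumGroups
-- ===== SOURCE A (Python) =====
-- from typing import List
--
-- def maximumGroups(grades: List[int]) -> int:
--     n = len(grades)
--     left = 0
--     right = n + 1
--     while left < right:
--         mid = (left + right) // 2
--         total = mid * (mid + 1) // 2
--         if total <= n:
--             left = mid + 1
--         else:
--             right = mid
--     return left - 1
-- ===== SOURCE B (Python) =====
-- from typing import List
--
-- def maximumGroups(grades: List[int]) -> int:
--     n = len(grades)
--     k = 0
--     used = 0
--     while used + (k + 1) <= n:
--         k += 1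
--         used += k
--     return k
-- ===== Notes on version B (the rewrite author's own statement) =====
-- stated objective: idiomatic
-- what changed: Replaces the binary search over candidate group counts with a forward incremental loop that grows the group counter and a running total of used students until the next group would not fit.
import Mathlib
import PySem

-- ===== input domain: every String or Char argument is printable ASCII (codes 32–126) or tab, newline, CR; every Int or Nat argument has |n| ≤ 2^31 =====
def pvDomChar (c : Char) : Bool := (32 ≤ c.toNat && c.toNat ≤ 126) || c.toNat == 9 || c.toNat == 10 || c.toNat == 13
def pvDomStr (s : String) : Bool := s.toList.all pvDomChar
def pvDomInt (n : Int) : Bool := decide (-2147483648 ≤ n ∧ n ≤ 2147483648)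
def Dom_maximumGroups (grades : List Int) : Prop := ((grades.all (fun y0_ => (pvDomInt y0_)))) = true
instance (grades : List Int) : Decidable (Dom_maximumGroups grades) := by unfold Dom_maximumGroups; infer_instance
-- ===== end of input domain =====

-- B replaces A's binary search by an incremental loop growing the group counter (objective: idiomatic).

-- ===== PORT A =====
-- A's `while left < right` binary-search loop; the fuel argument only makes the recursion
-- structural (it is chosen large enough that it is never exhausted)
def pvBsLoop : Nat → Int → Int → Int → Int
  | 0, _, left, _ => left
  | fuel + 1, n, left, right =>
    if left < right then
      let mid := PySem.Int.floordiv (left + right) 2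
      let total := PySem.Int.floordiv (mid * (mid + 1)) 2
      if total ≤ n then pvBsLoop fuel n (mid + 1) right else pvBsLoop fuel n left mid
    else left

def maximumGroups (grades : List Int) : Int :=
  pvBsLoop (grades.length + 2) (grades.length : Int) 0 ((grades.length : Int) + 1) - 1

-- ===== PORT B =====
-- B's `while used + (k + 1) <= n` loop; fuel as above
def pvIncLoop : Nat → Int → Int → Int → Int
  | 0, _, _, k => k
  | fuel + 1, n, used, k =>
    if used + (k + 1) ≤ n then pvIncLoop fuel n (used + (k + 1)) (k + 1) else k

def maximumGroups_alt (grades : List Int) : Int :=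
  pvIncLoop (grades.length + 1) (grades.length : Int) 0 0

-- ===== PRECONDITION & SPEC =====
def Spec_maximumGroups (grades : List Int) (out : Int) : Prop := out = maximumGroups_alt grades
instance (grades : List Int) (out : Int) : Decidable (Spec_maximumGroups grades out) := by unfold Spec_maximumGroups; infer_instance

-- ===== CLAIM (what is proved, stated in full; the proofs are below) =====
def Claim_equal_maximumGroups : Prop := ∀ (grades : List Int), Dom_maximumGroups grades → Spec_maximumGroups grades (maximumGroups grades)

-- ===== LEMMAS AND PROOFS =====

-- the answer is the unique r ≥ 0 with r(r+1) ≤ 2n < (r+1)(r+2)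
theorem pv_uniq (n r s : Int) (hr0 : 0 ≤ r) (hs0 : 0 ≤ s)
    (hr1 : r * (r + 1) ≤ 2 * n) (hr2 : 2 * n < (r + 1) * (r + 2))
    (hs1 : s * (s + 1) ≤ 2 * n) (hs2 : 2 * n < (s + 1) * (s + 2)) : r = s := by
  rcases lt_trichotomy r s with h | h | h
  · exfalso; nlinarith
  · exact h
  · exfalso; nlinarith

-- invariant of A's binary search: with enough fuel it lands on the L with L(L-1) ≤ 2n < L(L+1)
theorem pvBsLoop_char (fuel : Nat) (n left right : Int) (hfuel : (right - left).toNat < fuel)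
    (h0 : 0 ≤ left) (hlr : left ≤ right)
    (hl : left * (left - 1) ≤ 2 * n) (hr : 2 * n < right * (right + 1)) :
    pvBsLoop fuel n left right * (pvBsLoop fuel n left right - 1) ≤ 2 * n ∧
    2 * n < pvBsLoop fuel n left right * (pvBsLoop fuel n left right + 1) ∧
    0 ≤ pvBsLoop fuel n left right := by
  induction fuel generalizing left right with
  | zero => omega
  | succ fuel ih =>
    by_cases h : left < right
    · have hev : left + right ≥ 0 := by omega
      set mid := PySem.Int.floordiv (left + right) 2 with hmiddef
      have hmid : left ≤ mid ∧ mid ≤ right := PySem.Int.floordiv_two_mid_bounds (le_of_lt h)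
      have hmlt : mid < right := by
        rw [hmiddef, PySem.Int.floordiv_eq_ediv_of_pos (by omega)]
        omega
      obtain ⟨m, hm⟩ := Int.even_mul_succ_self mid
      have htotv : PySem.Int.floordiv (mid * (mid + 1)) 2 = m := by
        rw [PySem.Int.floordiv_eq_ediv_of_pos (by omega), hm]
        omega
      by_cases htot : PySem.Int.floordiv (mid * (mid + 1)) 2 ≤ n
      · have hle : mid * (mid + 1) ≤ 2 * n := by omega
        have step : pvBsLoop (fuel + 1) n left right = pvBsLoop fuel n (mid + 1) right := by
          rw [pvBsLoop, if_pos h]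
          exact if_pos htot
        rw [step]
        exact ih (mid + 1) right (by omega) (by omega) (by omega)
          (by have : (mid + 1) * (mid + 1 - 1) = mid * (mid + 1) := by ring
              omega) hr
      · have hgt : 2 * n < mid * (mid + 1) := by omega
        have step : pvBsLoop (fuel + 1) n left right = pvBsLoop fuel n left mid := by
          rw [pvBsLoop, if_pos h]
          exact if_neg htot
        rw [step]
        exact ih left mid (by omega) h0 hmid.1 hl hgt
    · rw [pvBsLoop, if_neg h]
      have : left = right := by omega
      subst this
      exact ⟨by omega, by omega, h0⟩

-- invariant of B's incremental loop
theorem pvIncLoop_char (fuel : Nat) (n used k : Int) (hfuel : (n - used).toNat < fuel)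
    (hk : 0 ≤ k) (hinv : 2 * used = k * (k + 1)) (hle : used ≤ n) :
    pvIncLoop fuel n used k * (pvIncLoop fuel n used k + 1) ≤ 2 * n ∧
    2 * n < (pvIncLoop fuel n used k + 1) * (pvIncLoop fuel n used k + 2) ∧
    0 ≤ pvIncLoop fuel n used k := by
  induction fuel generalizing used k with
  | zero => omega
  | succ fuel ih =>
    by_cases h : used + (k + 1) ≤ n
    · rw [pvIncLoop, if_pos h]
      refine ih (used + (k + 1)) (k + 1) (by omega) (by omega) ?_ (by omega)
      have : (k + 1) * (k + 1 + 1) = k * (k + 1) + 2 * (k + 1) := by ring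
      omega
    · rw [pvIncLoop, if_neg h]
      refine ⟨by omega, ?_, hk⟩
      have : (k + 1) * (k + 2) = k * (k + 1) + 2 * k + 2 := by ring
      omega

-- ===== VERDICT (by name: the statement is the Claim_ definition above) =====
theorem maximumGroups_spec : Claim_equal_maximumGroups := by
  intro grades _
  unfold Spec_maximumGroups maximumGroups maximumGroups_alt
  set n : Int := (grades.length : Int) with hn
  have hn0 : 0 ≤ n := by positivity
  have hA := pvBsLoop_char (grades.length + 2) n 0 (n + 1) (by omega) le_rfl (by omega)
    (by omega) (by nlinarith)
  have hB := pvIncLoop_char (grades.length + 1) n 0 0 (by omega) le_rfl (by norm_num) hn0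
  set L := pvBsLoop (grades.length + 2) n 0 (n + 1) with hL
  have hL1 : 1 ≤ L := by nlinarith [hA.2.1, hA.2.2]
  have h1 : (L - 1) * (L - 1 + 1) ≤ 2 * n := by nlinarith [hA.1]
  have h2 : 2 * n < (L - 1 + 1) * (L - 1 + 2) := by nlinarith [hA.2.1]
  exact pv_uniq n (L - 1) (pvIncLoop (grades.length + 1) n 0 0) (by omega) hB.2.2 h1 h2 hB.1 hB.2.1
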